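-- pv_equiv track=rewrite | github.com/r-peng/quimb | quimb/tensor/fermion/fermion_2d_vmc_save.py | hop
-- ===== SOURCE A (Python) =====
-- pn_map = [0,1,1,2]
--
-- def hop(ix1,ix2,config):
--     i1,i2 = config[ix1],config[ix2]
--     if i1==i2:
--         return []
--     n1,n2 = pn_map[i1],pn_map[i2]
--     nsum,ndiff = n1+n2,abs(n1-n2)
--     if ndiff==1:
--         sign = 1 if nsum==1 else -1
--         config_new = list(config)
--         config_new[ix1] = i2
--         config_new[ix2] = i1
--         return [(tuple(config_new),sign)]
--     configs = []
--     if ndiff==2: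
--         for i1_new,i2_new in ((1,2),(2,1)):
--             sign = i1_new-i2_new
--             config_new = list(config)
--             config_new[ix1] = i1_new
--             config_new[ix2] = i2_new
--             configs.append((tuple(config_new),sign))
--     if ndiff==0:
--         sign = i1-i2
--         for i1_new,i2_new in ((0,3),(3,0)):
--             config_new = list(config)
--             config_new[ix1] = i1_new
--             config_new[ix2] = i2_new
--             configs.append((tuple(config_new),sign))
--     return configs
-- ===== SOURCE B (Python) =====
-- # Branch dispatch replaced by a precomputed literal table: (i1,i2) -> [(new_i1,new_i2,sign),...]
-- TABLE = {
--     (0, 1): [(1, 0, 1)],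
--     (0, 2): [(2, 0, 1)],
--     (0, 3): [(1, 2, -1), (2, 1, 1)],
--     (1, 0): [(0, 1, 1)],
--     (1, 2): [(0, 3, -1), (3, 0, -1)],
--     (1, 3): [(3, 1, -1)],
--     (2, 0): [(0, 2, 1)],
--     (2, 1): [(0, 3, 1), (3, 0, 1)],
--     (2, 3): [(3, 2, -1)],
--     (3, 0): [(1, 2, -1), (2, 1, 1)],
--     (3, 1): [(1, 3, -1)],
--     (3, 2): [(2, 3, -1)],
-- }
--
-- def hop(ix1, ix2, config):
--     i1, i2 = config[ix1], config[ix2]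
--     if i1 == i2:
--         return []
--     entries = TABLE[(i1, i2)]
--     out = []
--     for a, b, sign in entries:
--         config_new = list(config)
--         config_new[ix1] = a
--         config_new[ix2] = b
--         out.append((tuple(config_new), sign))
--     return out
-- ===== Notes on version B (the rewrite author's own statement) =====
-- stated objective: idiomatic
-- what changed: The nested ndiff/nsum branch dispatch is replaced by a precomputed literal table mapping each unequal occupancy pair (i1,i2) in 0..3 to its (new_i1,new_i2,sign) triples, with one uniform loop building the output. Pre_ restricts to in-range indices with the two occupancies equal or both in 0..3 (the natural domain): outside it A raises IndexError, except unequal values in -4..-1 where A returns only via accidental pn_map negative-index wraparound and B raises KeyError.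
-- outside the precondition, e.g. on hop(0, 1, (-1, 0)): A returns [((1, 2), -1), ((2, 1), 1)], B raises KeyError
import Mathlib
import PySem

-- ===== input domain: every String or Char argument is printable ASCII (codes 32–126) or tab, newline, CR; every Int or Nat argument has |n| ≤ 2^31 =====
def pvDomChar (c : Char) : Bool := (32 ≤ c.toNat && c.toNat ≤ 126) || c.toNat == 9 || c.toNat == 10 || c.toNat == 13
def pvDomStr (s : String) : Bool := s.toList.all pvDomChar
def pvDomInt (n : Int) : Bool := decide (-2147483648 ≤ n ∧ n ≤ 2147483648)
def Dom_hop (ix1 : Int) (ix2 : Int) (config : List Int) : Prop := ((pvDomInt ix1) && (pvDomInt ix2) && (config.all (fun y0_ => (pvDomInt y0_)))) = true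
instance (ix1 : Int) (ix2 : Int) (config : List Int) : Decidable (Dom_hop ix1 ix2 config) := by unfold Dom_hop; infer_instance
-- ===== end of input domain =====

-- B replaces A's nested ndiff/nsum branch dispatch by a precomputed literal table (i1,i2) ↦ triples
-- (new_i1,new_i2,sign) and one uniform loop (idiomatic, same cost). Non-mutating, like A.

-- ===== PORT A =====
def pnMap : List Int := [0, 1, 1, 2]

def hop (ix1 : Int) (ix2 : Int) (config : List Int) : List (List Int × Int) :=
  match PySem.List.pyGet? config ix1, PySem.List.pyGet? config ix2 with
  | some i1, some i2 =>
    if i1 = i2 then []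
    else
      match PySem.List.pyGet? pnMap i1, PySem.List.pyGet? pnMap i2 with
      | some n1, some n2 =>
        let nsum := n1 + n2
        let ndiff := |n1 - n2|
        if ndiff = 1 then
          let sign : Int := if nsum = 1 then 1 else -1
          [(PySem.List.pySetD (PySem.List.pySetD config ix1 i2) ix2 i1, sign)]
        else
          let configs : List (List Int × Int) :=
            if ndiff = 2 then
              [((1 : Int), (2 : Int)), (2, 1)].foldl (fun acc p =>
                acc ++ [(PySem.List.pySetD (PySem.List.pySetD config ix1 p.1) ix2 p.2, p.1 - p.2)]) []
            else []
          let configs :=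
            if ndiff = 0 then
              let sign := i1 - i2
              [((0 : Int), (3 : Int)), (3, 0)].foldl (fun acc p =>
                acc ++ [(PySem.List.pySetD (PySem.List.pySetD config ix1 p.1) ix2 p.2, sign)]) configs
            else configs
          configs
      | _, _ => []  -- pn_map IndexError; outside Pre_
  | _, _ => []  -- IndexError; outside Pre_

-- ===== PORT B =====
def hopTable : PySem.Dict (Int × Int) (List (Int × Int × Int)) :=
  PySem.Dict.ofList [
    ((0, 1), [(1, 0, 1)]),
    ((0, 2), [(2, 0, 1)]),
    ((0, 3), [(1, 2, -1), (2, 1, 1)]),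
    ((1, 0), [(0, 1, 1)]),
    ((1, 2), [(0, 3, -1), (3, 0, -1)]),
    ((1, 3), [(3, 1, -1)]),
    ((2, 0), [(0, 2, 1)]),
    ((2, 1), [(0, 3, 1), (3, 0, 1)]),
    ((2, 3), [(3, 2, -1)]),
    ((3, 0), [(1, 2, -1), (2, 1, 1)]),
    ((3, 1), [(1, 3, -1)]),
    ((3, 2), [(2, 3, -1)])]

def hop_alt (ix1 : Int) (ix2 : Int) (config : List Int) : List (List Int × Int) :=
  match PySem.List.pyGet? config ix1 with
  | none => []  -- IndexError; outside Pre_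
  | some i1 =>
    match PySem.List.pyGet? config ix2 with
    | none => []  -- IndexError; outside Pre_
    | some i2 =>
      if i1 = i2 then []
      else
        match PySem.Dict.get? hopTable (i1, i2) with
        | none => []  -- KeyError; outside Pre_
        | some entries =>
          entries.foldl (fun out e =>
            out ++ [(PySem.List.pySetD (PySem.List.pySetD config ix1 e.1) ix2 e.2.1, e.2.2)]) []

-- ===== PRECONDITION & SPEC =====
-- Pre_ restricts to in-range indices with the two occupancies equal or both in 0..3 (the natural
-- domain): outside it A raises IndexError, except unequal values in -4..-1 where A returns only via
-- accidental pn_map negative-index wraparound and B raises KeyError.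
def Pre_hop (ix1 : Int) (ix2 : Int) (config : List Int) : Prop :=
  PySem.Raise.InRange config.length ix1 ∧ PySem.Raise.InRange config.length ix2 ∧
  (PySem.List.pyGetD config ix1 0 = PySem.List.pyGetD config ix2 0 ∨
    (0 ≤ PySem.List.pyGetD config ix1 0 ∧ PySem.List.pyGetD config ix1 0 ≤ 3 ∧
     0 ≤ PySem.List.pyGetD config ix2 0 ∧ PySem.List.pyGetD config ix2 0 ≤ 3))
instance (ix1 : Int) (ix2 : Int) (config : List Int) : Decidable (Pre_hop ix1 ix2 config) := by unfold Pre_hop; infer_instance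

def pvWitness_hop : Int × Int × List Int := (0, 2, [1, 0, 3])

def Spec_hop (ix1 : Int) (ix2 : Int) (config : List Int) (out : List (List Int × Int)) : Prop := out = hop_alt ix1 ix2 config
instance (ix1 : Int) (ix2 : Int) (config : List Int) (out : List (List Int × Int)) : Decidable (Spec_hop ix1 ix2 config out) := by unfold Spec_hop; infer_instance

-- ===== CLAIM (what is proved, stated in full; the proofs are below) =====
def Claim_equal_hop : Prop := ∀ (ix1 : Int) (ix2 : Int) (config : List Int), Dom_hop ix1 ix2 config → Pre_hop ix1 ix2 config → Spec_hop ix1 ix2 config (hop ix1 ix2 config)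

-- ===== LEMMAS AND PROOFS =====
lemma pre_get (config : List Int) (ix : Int)
    (h : PySem.Raise.InRange config.length ix) :
    PySem.List.pyGet? config ix = some (PySem.List.pyGetD config ix 0) := by
  cases hg : PySem.List.pyGet? config ix with
  | none => rw [PySem.List.pyGet?_eq_none_iff] at hg; exact absurd h hg
  | some v => simp [PySem.List.pyGetD, hg]

-- ===== VERDICT (by name: the statement is the Claim_ definition above) =====
theorem hop_spec : Claim_equal_hop := by
  intro ix1 ix2 config _ hpre
  obtain ⟨h1, h2, hv⟩ := hpre
  unfold Spec_hop
  have g1 := pre_get config ix1 h1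
  have g2 := pre_get config ix2 h2
  rcases hv with heq | ⟨l1, u1, l2, u2⟩
  · rw [heq] at g1
    simp [hop, hop_alt, g1, g2]
  have c1 : PySem.List.pyGetD config ix1 0 = 0 ∨ PySem.List.pyGetD config ix1 0 = 1 ∨
      PySem.List.pyGetD config ix1 0 = 2 ∨ PySem.List.pyGetD config ix1 0 = 3 := by omega
  have c2 : PySem.List.pyGetD config ix2 0 = 0 ∨ PySem.List.pyGetD config ix2 0 = 1 ∨
      PySem.List.pyGetD config ix2 0 = 2 ∨ PySem.List.pyGetD config ix2 0 = 3 := by omega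
  rcases c1 with e1 | e1 | e1 | e1 <;> rcases c2 with e2 | e2 | e2 | e2 <;>
    rw [e1] at g1 <;> rw [e2] at g2 <;>
    simp only [hop, hop_alt, g1, g2] <;> rfl
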